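-- pv_equiv track=rewrite | github.com/seanrcollings/arc | arc/utils.py | string_suggestions
-- ===== SOURCE A (Python) =====
-- import typing as t
--
-- def levenshtein(s1: str, s2: str):
--     if len(s1) < len(s2):
--         return levenshtein(s2, s1)
--
--     # len(s1) >= len(s2)
--     if len(s2) == 0:
--         return len(s1)
--
--     previous_row = range(len(s2) + 1)
--     for i, c1 in enumerate(s1):
--         current_row = [i + 1]
--         for j, c2 in enumerate(s2):
--             insertions = (
--                 previous_row[j + 1] + 1
--             )  # j+1 instead of j since previous_row and current_row are one character longer
--             deletions = current_row[j] + 1  # than s2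
--             substitutions = previous_row[j] + (c1 != c2)
--             current_row.append(min(insertions, deletions, substitutions))
--         previous_row = current_row  # type: ignore
--
--     return previous_row[-1]
--
-- def string_suggestions(
--     source: t.Iterable[str], possibilities: t.Iterable[str], max_distance: int
-- ):
--     suggestions: dict[str, list[str]] = {}
--
--     for string in source:
--         suggestions[string] = [
--             p for p in possibilities if levenshtein(string, p) <= max_distance
--         ]
--
--     return suggestions
-- ===== SOURCE B (Python) =====
-- import typing as t
--
-- def _within(s1: str, s2: str, k: int) -> bool:
--     """Is levenshtein(s1, s2) <= k?  Length-difference prefilter, and per-row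
--     early exit: once every entry of a DP row exceeds k, the distance does too."""
--     if len(s1) < len(s2):
--         s1, s2 = s2, s1
--     if len(s1) - len(s2) > k:
--         return False
--     prev = list(range(len(s2) + 1))
--     for i, c1 in enumerate(s1):
--         cur = [i + 1]
--         best = i + 1
--         for j, c2 in enumerate(s2):
--             d = min(prev[j + 1] + 1, cur[-1] + 1, prev[j] + (c1 != c2))
--             cur.append(d)
--             if d < best:
--                 best = d
--         if best > k:
--             return False
--         prev = cur
--     return prev[-1] <= k
--
-- def string_suggestions(
--     source: t.Iterable[str], possibilities: t.Iterable[str], max_distance: int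
-- ):
--     suggestions: dict[str, list[str]] = {}
--     for string in source:
--         suggestions[string] = [
--             p for p in possibilities if _within(string, p, max_distance)
--         ]
--     return suggestions
-- ===== Notes on version B (the rewrite author's own statement) =====
-- stated objective: alternative
-- what changed: B replaces the full Levenshtein computation with a bounded-distance check: a length-difference prefilter skips the DP entirely and the DP aborts as soon as a whole row exceeds max_distance, instead of always computing the exact distance and comparing it.
import Mathlib
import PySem

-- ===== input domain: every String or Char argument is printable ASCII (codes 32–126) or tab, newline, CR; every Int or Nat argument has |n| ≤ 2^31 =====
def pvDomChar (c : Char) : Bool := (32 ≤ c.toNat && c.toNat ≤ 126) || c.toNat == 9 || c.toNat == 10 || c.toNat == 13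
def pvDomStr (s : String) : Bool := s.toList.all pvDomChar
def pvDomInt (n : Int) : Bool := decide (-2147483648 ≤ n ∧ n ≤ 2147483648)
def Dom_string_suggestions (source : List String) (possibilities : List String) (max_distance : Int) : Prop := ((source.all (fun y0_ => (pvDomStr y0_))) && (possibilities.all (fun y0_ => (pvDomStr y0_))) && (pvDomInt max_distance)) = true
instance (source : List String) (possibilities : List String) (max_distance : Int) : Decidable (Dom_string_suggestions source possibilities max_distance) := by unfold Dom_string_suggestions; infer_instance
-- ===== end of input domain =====

-- B replaces the always-exact Levenshtein computation with a bounded-distance check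
-- (length-difference prefilter + per-row early exit); same worst-case cost, different algorithm.

-- ===== PORT A =====
-- inner 'for j, c2 in enumerate(s2)' loop of A's levenshtein
def levRowA (prev : List Int) (i : Int) (c1 : Char) (s2 : List Char) : List Int :=
  (PySem.List.enumerate s2).foldl
    (fun cur jc =>
      let insertions := PySem.List.pyGetD prev (jc.1 + 1) 0 + 1
      let deletions := PySem.List.pyGetD cur jc.1 0 + 1
      let substitutions := PySem.List.pyGetD prev jc.1 0 + (if c1 ≠ jc.2 then 1 else 0)
      cur ++ [min insertions (min deletions substitutions)])
    [i + 1]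

def levenshteinA (s1 s2 : List Char) : Int :=
  if s1.length < s2.length then levenshteinA s2 s1
  else if s2.length = 0 then (s1.length : Int)
  else
    PySem.List.pyGetD
      ((PySem.List.enumerate s1).foldl (fun prev ic => levRowA prev ic.1 ic.2 s2)
        (PySem.List.pyRange 0 ((s2.length : Int) + 1) 1))
      (-1) 0
termination_by s2.length

def string_suggestions (source : List String) (possibilities : List String) (max_distance : Int) : List (String × List String) :=
  (source.foldl
    (fun (d : PySem.Dict String (List String)) s =>
      d.insert s (possibilities.filter (fun p => decide (levenshteinA s.toList p.toList ≤ max_distance))))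
    PySem.Dict.empty).items

-- ===== PORT B =====
-- inner loop of B's _within: grows the row and tracks its running minimum
def levBandRowB (prev : List Int) (i : Int) (c1 : Char) (s2 : List Char) : List Int × Int :=
  (PySem.List.enumerate s2).foldl
    (fun st jc =>
      let d := min (PySem.List.pyGetD prev (jc.1 + 1) 0 + 1)
                (min (PySem.List.pyGetD st.1 (-1) 0 + 1)
                     (PySem.List.pyGetD prev jc.1 0 + (if c1 ≠ jc.2 then 1 else 0)))
      (st.1 ++ [d], if d < st.2 then d else st.2))
    ([i + 1], i + 1)

-- the 'for i, c1 in enumerate(s1)' loop with its early 'return False'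
def withinLoopB (prev : List Int) (pairs : List (Int × Char)) (s2 : List Char) (k : Int) : Bool :=
  match pairs with
  | [] => decide (PySem.List.pyGetD prev (-1) 0 ≤ k)
  | ic :: rest =>
    let cb := levBandRowB prev ic.1 ic.2 s2
    if cb.2 > k then false else withinLoopB cb.1 rest s2 k

def withinB (s1 s2 : List Char) (k : Int) : Bool :=
  if s1.length < s2.length then withinB s2 s1 k
  else if ((s1.length : Int) - (s2.length : Int)) > k then false
  else withinLoopB (PySem.List.pyRange 0 ((s2.length : Int) + 1) 1) (PySem.List.enumerate s1) s2 k
termination_by s2.length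

def string_suggestions_alt (source : List String) (possibilities : List String) (max_distance : Int) : List (String × List String) :=
  (source.foldl
    (fun (d : PySem.Dict String (List String)) s =>
      d.insert s (possibilities.filter (fun p => withinB s.toList p.toList max_distance)))
    PySem.Dict.empty).items

-- ===== PRECONDITION & SPEC =====
def Spec_string_suggestions (source : List String) (possibilities : List String) (max_distance : Int) (out : List (String × List String)) : Prop := out = string_suggestions_alt source possibilities max_distance
instance (source : List String) (possibilities : List String) (max_distance : Int) (out : List (String × List String)) : Decidable (Spec_string_suggestions source possibilities max_distance out) := by unfold Spec_string_suggestions; infer_instance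

-- ===== CLAIM (what is proved, stated in full; the proofs are below) =====
def Claim_equal_string_suggestions : Prop := ∀ (source : List String) (possibilities : List String) (max_distance : Int), Dom_string_suggestions source possibilities max_distance → Spec_string_suggestions source possibilities max_distance (string_suggestions source possibilities max_distance)

-- ===== LEMMAS AND PROOFS =====

-- clean model of one DP row body: walks prev from the front, carrying the last entry
def nr (pp : List Int) (last : Int) (c1 : Char) (ys : List Char) : List Int :=
  match pp, ys with
  | p0 :: p1 :: rest, y :: ys' =>
    let d := min (p1 + 1) (min (last + 1) (p0 + (if c1 ≠ y then 1 else 0)))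
    d :: nr (p1 :: rest) d c1 ys'
  | _, _ => []

-- positional lower bound: LB l v means l[j] ≥ v - j for every j
def LB : List Int → Int → Prop
  | [], _ => True
  | p :: rest, v => v ≤ p ∧ LB rest (v - 1)

theorem nr_length (ys : List Char) : ∀ (pp : List Int) (last : Int) (c1 : Char),
    pp.length = ys.length + 1 → (nr pp last c1 ys).length = ys.length := by
  induction ys with
  | nil => intro pp last c1 _; cases pp with
    | nil => simp [nr]
    | cons p0 t => cases t <;> simp [nr]
  | cons y ys' ih =>
    intro pp last c1 hlen
    match pp with
    | p0 :: p1 :: rest =>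
      simp only [nr, List.length_cons]
      rw [ih (p1 :: rest) _ c1 (by simpa using hlen)]

theorem LB_of_all (l : List Int) (v : Int) (h : ∀ e ∈ l, v ≤ e) : LB l v := by
  induction l generalizing v with
  | nil => trivial
  | cons p rest ih =>
    exact ⟨h p (by simp), ih (v - 1) (fun e he => by have := h e (by simp [he]); omega)⟩

theorem nr_lower (ys : List Char) : ∀ (pp : List Int) (last : Int) (c1 : Char) (M : Int),
    (∀ p ∈ pp, M ≤ p) → M ≤ last + 1 → ∀ e ∈ nr pp last c1 ys, M ≤ e := by
  induction ys with
  | nil =>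
    intro pp last c1 M _ _ e he
    match pp with
    | [] => simp [nr] at he
    | [p0] => simp [nr] at he
    | p0 :: p1 :: rest => simp [nr] at he
  | cons y ys' ih =>
    intro pp last c1 M hpp hlast e he
    match pp with
    | [] => simp [nr] at he
    | [p0] => simp [nr] at he
    | p0 :: p1 :: rest =>
      simp only [nr] at he
      have hp0 : M ≤ p0 := hpp p0 (by simp)
      have hp1 : M ≤ p1 := hpp p1 (by simp)
      have hd : M ≤ min (p1 + 1) (min (last + 1) (p0 + (if c1 ≠ y then 1 else 0))) := by
        have : (0:Int) ≤ (if c1 ≠ y then 1 else 0) := by split <;> omega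
        simp only [le_min_iff]; omega
      rcases List.mem_cons.mp he with rfl | he'
      · exact hd
      · exact ih (p1 :: rest) _ c1 M (fun p hp => hpp p (by simp at hp ⊢; tauto)) (by omega) e he'

theorem nr_LB (ys : List Char) : ∀ (pp : List Int) (last v : Int) (c1 : Char),
    LB pp v → v - 1 ≤ last → LB (nr pp last c1 ys) v := by
  induction ys with
  | nil =>
    intro pp last v c1 _ _
    match pp with
    | [] => simp [nr, LB]
    | [p0] => simp [nr, LB]
    | p0 :: p1 :: rest => simp [nr, LB]
  | cons y ys' ih =>
    intro pp last v c1 hpp hlast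
    match pp with
    | [] => simp [nr, LB]
    | [p0] => simp [nr, LB]
    | p0 :: p1 :: rest =>
      obtain ⟨h0, h1, h2⟩ := hpp
      refine ⟨?_, ?_⟩
      · have : (0:Int) ≤ (if c1 ≠ y then 1 else 0) := by split <;> omega
        simp only [le_min_iff]; omega
      · apply ih (p1 :: rest) _ (v - 1) c1 ⟨by omega, h2⟩
        have : (0:Int) ≤ (if c1 ≠ y then 1 else 0) := by split <;> omega
        simp only [le_min_iff]; omega

theorem LB_getLast (l : List Int) (v : Int) (hl : LB l v) (h : l ≠ []) :
    v - ((l.length : Int) - 1) ≤ l.getLast h := by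
  induction l generalizing v with
  | nil => simp at h
  | cons p rest ih =>
    obtain ⟨h0, h1⟩ := hl
    cases rest with
    | nil => simpa using h0
    | cons q t =>
      have := ih (v := v - 1) h1 (by simp)
      rw [List.getLast_cons (by simp)]
      simp only [List.length_cons] at this ⊢
      push_cast at this ⊢
      omega

theorem drop_decomp (prev : List Int) (j0 n : Nat) (h : prev.length = j0 + n + 2) :
    ∃ p0 p1 rest, prev.drop j0 = p0 :: p1 :: rest ∧
      PySem.List.pyGetD prev (j0 : Int) 0 = p0 ∧
      PySem.List.pyGetD prev ((j0 : Int) + 1) 0 = p1 ∧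
      prev.drop (j0 + 1) = p1 :: rest := by
  have hlen : (prev.drop j0).length = n + 2 := by simp [List.length_drop]; omega
  rcases hL : prev.drop j0 with _ | ⟨p0, _ | ⟨p1, rest⟩⟩
  · rw [hL] at hlen; simp at hlen
  · rw [hL] at hlen; simp at hlen
  refine ⟨p0, p1, rest, rfl, ?_, ?_, ?_⟩
  · have h0 : prev[j0]? = some p0 := by
      have h' : (prev.drop j0)[0]? = some p0 := by rw [hL]; rfl
      rw [List.getElem?_drop] at h'; simpa using h'
    rw [PySem.List.pyGetD_natCast, List.getD_eq_getElem?_getD, h0]; rfl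
  · have h1 : prev[j0 + 1]? = some p1 := by
      have h' : (prev.drop j0)[1]? = some p1 := by rw [hL]; rfl
      rw [List.getElem?_drop] at h'; simpa using h'
    have hc : ((j0 : Int) + 1) = ((j0 + 1 : Nat) : Int) := by push_cast; ring
    rw [hc, PySem.List.pyGetD_natCast, List.getD_eq_getElem?_getD, h1]; rfl
  · have : prev.drop (j0 + 1) = (prev.drop j0).drop 1 := by
      rw [List.drop_drop, Nat.add_comm]
    rw [this, hL]; simp

theorem bridgeA (prev : List Int) (c1 : Char) (ys : List Char) : ∀ (j0 : Nat) (cur : List Int) (h : cur ≠ []),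
    prev.length = j0 + ys.length + 1 → cur.length = j0 + 1 →
    (PySem.List.enumerate ys (j0 : Int)).foldl
      (fun cur jc =>
        let insertions := PySem.List.pyGetD prev (jc.1 + 1) 0 + 1
        let deletions := PySem.List.pyGetD cur jc.1 0 + 1
        let substitutions := PySem.List.pyGetD prev jc.1 0 + (if c1 ≠ jc.2 then 1 else 0)
        cur ++ [min insertions (min deletions substitutions)])
      cur = cur ++ nr (prev.drop j0) (cur.getLast h) c1 ys := by
  induction ys with
  | nil =>
    intro j0 cur h _ _
    simp [PySem.List.enumerate, nr]
  | cons y ys' ih =>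
    intro j0 cur h hprev hcur
    simp only [List.length_cons] at hprev
    obtain ⟨p0, p1, rest, hdrop, hg0, hg1, hdrop1⟩ := drop_decomp prev j0 ys'.length (by omega)
    rw [PySem.List.enumerate_cons]
    simp only [List.foldl_cons]
    have hcurget : PySem.List.pyGetD cur (j0 : Int) 0 = cur.getLast h := by
      have h0 : cur[j0]? = some (cur.getLast h) := by
        rw [List.getLast_eq_getElem, List.getElem?_eq_getElem (by omega)]
        simp [show j0 = cur.length - 1 by omega]
      rw [PySem.List.pyGetD_natCast, List.getD_eq_getElem?_getD, h0]; rfl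
    rw [hg0, hg1, hcurget]
    set d := min (p1 + 1) (min (cur.getLast h + 1) (p0 + (if c1 ≠ y then 1 else 0))) with hd
    have hcast : ((j0 : Int) + 1) = ((j0 + 1 : Nat) : Int) := by push_cast; ring
    rw [hcast, ih (j0 + 1) (cur ++ [d]) (by simp) (by omega) (by simp [hcur])]
    rw [hdrop1, hdrop]
    have hlast : (cur ++ [d]).getLast (by simp) = d := by simp
    rw [hlast]
    simp [nr, hd]

theorem rowA_eq (prev : List Int) (i : Int) (c1 : Char) (ys : List Char)
    (h : prev.length = ys.length + 1) :
    levRowA prev i c1 ys = (i + 1) :: nr prev (i + 1) c1 ys := by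
  unfold levRowA
  have := bridgeA prev c1 ys 0 [i + 1] (by simp) (by omega) (by simp)
  simpa using this

theorem bridgeB (prev : List Int) (c1 : Char) (ys : List Char) : ∀ (j0 : Nat) (cur : List Int) (best : Int) (h : cur ≠ []),
    prev.length = j0 + ys.length + 1 →
    (PySem.List.enumerate ys (j0 : Int)).foldl
      (fun st jc =>
        let d := min (PySem.List.pyGetD prev (jc.1 + 1) 0 + 1)
                  (min (PySem.List.pyGetD st.1 (-1) 0 + 1)
                       (PySem.List.pyGetD prev jc.1 0 + (if c1 ≠ jc.2 then 1 else 0)))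
        (st.1 ++ [d], if d < st.2 then d else st.2))
      (cur, best)
      = (cur ++ nr (prev.drop j0) (cur.getLast h) c1 ys,
         (nr (prev.drop j0) (cur.getLast h) c1 ys).foldl min best) := by
  induction ys with
  | nil =>
    intro j0 cur best h _
    simp [PySem.List.enumerate, nr]
  | cons y ys' ih =>
    intro j0 cur best h hprev
    simp only [List.length_cons] at hprev
    obtain ⟨p0, p1, rest, hdrop, hg0, hg1, hdrop1⟩ := drop_decomp prev j0 ys'.length (by omega)
    rw [PySem.List.enumerate_cons]
    simp only [List.foldl_cons]
    rw [PySem.List.pyGetD_neg_one cur 0 h, hg0, hg1]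
    set d := min (p1 + 1) (min (cur.getLast h + 1) (p0 + (if c1 ≠ y then 1 else 0))) with hd
    have hcast : ((j0 : Int) + 1) = ((j0 + 1 : Nat) : Int) := by push_cast; ring
    rw [hcast, ih (j0 + 1) (cur ++ [d]) (if d < best then d else best) (by simp) (by omega)]
    rw [hdrop1, hdrop]
    have hlast : (cur ++ [d]).getLast (by simp) = d := by simp
    rw [hlast]
    simp only [nr, hd, List.append_assoc]
    have hmin : (if d < best then d else best) = min best d := by split <;> omega
    rw [hmin]
    simp [hd]

theorem rowB_eq (prev : List Int) (i : Int) (c1 : Char) (ys : List Char)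
    (h : prev.length = ys.length + 1) :
    levBandRowB prev i c1 ys =
      ((i + 1) :: nr prev (i + 1) c1 ys, (nr prev (i + 1) c1 ys).foldl min (i + 1)) := by
  unfold levBandRowB
  have := bridgeB prev c1 ys 0 [i + 1] (i + 1) (by simp) (by omega)
  simpa using this

theorem final_ge (s2 : List Char) (M : Int) : ∀ (rest : List Char) (i0 : Nat) (prev : List Int),
    (∀ e ∈ prev, M ≤ e) → M ≤ (i0 : Int) → prev.length = s2.length + 1 →
    (∀ e ∈ (PySem.List.enumerate rest (i0 : Int)).foldl (fun p ic => levRowA p ic.1 ic.2 s2) prev, M ≤ e) ∧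
    ((PySem.List.enumerate rest (i0 : Int)).foldl (fun p ic => levRowA p ic.1 ic.2 s2) prev).length = s2.length + 1 := by
  intro rest
  induction rest with
  | nil => intro i0 prev hall _ hlen; simpa [PySem.List.enumerate] using ⟨hall, hlen⟩
  | cons c rest' ih =>
    intro i0 prev hall hM hlen
    rw [PySem.List.enumerate_cons]
    simp only [List.foldl_cons]
    rw [rowA_eq prev (i0 : Int) c s2 hlen]
    have hcast : ((i0 : Int) + 1) = ((i0 + 1 : Nat) : Int) := by push_cast; ring
    rw [show PySem.List.enumerate rest' ((i0 : Int) + 1)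
          = PySem.List.enumerate rest' ((i0 + 1 : Nat) : Int) by rw [hcast]]
    apply ih (i0 + 1)
    · intro e he
      rcases List.mem_cons.mp he with rfl | he'
      · omega
      · exact nr_lower s2 prev ((i0 : Int) + 1) c M hall (by omega) e he'
    · push_cast; omega
    · simp [nr_length s2 prev _ c hlen]

theorem final_LB (s2 : List Char) : ∀ (rest : List Char) (i0 : Nat) (prev : List Int),
    LB prev (i0 : Int) → prev.length = s2.length + 1 →
    LB ((PySem.List.enumerate rest (i0 : Int)).foldl (fun p ic => levRowA p ic.1 ic.2 s2) prev) ((i0 : Int) + rest.length) ∧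
    ((PySem.List.enumerate rest (i0 : Int)).foldl (fun p ic => levRowA p ic.1 ic.2 s2) prev).length = s2.length + 1 := by
  intro rest
  induction rest with
  | nil => intro i0 prev hLB hlen; simpa [PySem.List.enumerate] using ⟨hLB, hlen⟩
  | cons c rest' ih =>
    intro i0 prev hLB hlen
    rw [PySem.List.enumerate_cons]
    simp only [List.foldl_cons]
    rw [rowA_eq prev (i0 : Int) c s2 hlen]
    have hcast : ((i0 : Int) + 1) = ((i0 + 1 : Nat) : Int) := by push_cast; ring
    rw [show PySem.List.enumerate rest' ((i0 : Int) + 1)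
          = PySem.List.enumerate rest' ((i0 + 1 : Nat) : Int) by rw [hcast]]
    have hnew : LB (((i0 : Int) + 1) :: nr prev ((i0 : Int) + 1) c s2) ((i0 : Int) + 1) := by
      refine ⟨le_refl _, ?_⟩
      have hv : ((i0 : Int) + 1 - 1) = (i0 : Int) := by ring
      rw [hv]
      exact nr_LB s2 prev ((i0 : Int) + 1) (i0 : Int) c hLB (by omega)
    have hih := ih (i0 + 1) (((i0 : Int) + 1) :: nr prev ((i0 : Int) + 1) c s2)
      (hcast ▸ hnew) (by simp [nr_length s2 prev _ c hlen])
    refine ⟨?_, hih.2⟩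
    have heq : ((i0 : Int) + ((c :: rest').length : Int)) = ((i0 + 1 : Nat) : Int) + (rest'.length : Int) := by
      simp only [List.length_cons]; push_cast; ring
    rw [heq]
    exact hih.1

theorem loop_main (s2 : List Char) (k : Int) : ∀ (rest : List Char) (i0 : Nat) (prev : List Int),
    prev.length = s2.length + 1 →
    withinLoopB prev (PySem.List.enumerate rest (i0 : Int)) s2 k =
      decide (PySem.List.pyGetD ((PySem.List.enumerate rest (i0 : Int)).foldl (fun p ic => levRowA p ic.1 ic.2 s2) prev) (-1) 0 ≤ k) := by
  intro rest
  induction rest with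
  | nil => intro i0 prev _; simp [PySem.List.enumerate, withinLoopB]
  | cons c rest' ih =>
    intro i0 prev hlen
    rw [PySem.List.enumerate_cons]
    simp only [List.foldl_cons, withinLoopB]
    simp only [rowB_eq prev (i0 : Int) c s2 hlen, rowA_eq prev (i0 : Int) c s2 hlen]
    set ds := nr prev ((i0 : Int) + 1) c s2 with hds
    set best := ds.foldl min ((i0 : Int) + 1) with hbest
    have hminle := PySem.List.foldl_min_le ds ((i0 : Int) + 1)
    have hcast : ((i0 : Int) + 1) = ((i0 + 1 : Nat) : Int) := by push_cast; ring
    by_cases hexit : best > k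
    · rw [if_pos hexit]
      have hfg := final_ge s2 best rest' (i0 + 1) (((i0 : Int) + 1) :: ds)
        (by intro e he
            rcases List.mem_cons.mp he with rfl | he'
            · exact hminle.1
            · exact hminle.2 e he')
        (by rw [← hcast]; exact hminle.1)
        (by simp [hds, nr_length s2 prev _ c hlen])
      rw [hcast] at hfg ⊢
      set fin := (PySem.List.enumerate rest' ((i0 + 1 : Nat) : Int)).foldl (fun p ic => levRowA p ic.1 ic.2 s2) ((((i0 + 1 : Nat) : Int)) :: ds) with hfin
      have hne : fin ≠ [] := by
        intro hcon; rw [hcon] at hfg; simp at hfg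
      rw [PySem.List.pyGetD_neg_one fin 0 hne]
      have := hfg.1 (fin.getLast hne) (List.getLast_mem hne)
      symm; simp; omega
    · rw [if_neg hexit]
      rw [hcast]
      exact ih (i0 + 1) _ (by simp [hds, nr_length s2 prev _ c hlen])

theorem finalRow_empty : ∀ (rest : List Char) (i0 : Nat) (prev : List Int), rest ≠ [] →
    (PySem.List.enumerate rest (i0 : Int)).foldl (fun p ic => levRowA p ic.1 ic.2 []) prev = [(i0 : Int) + rest.length] := by
  intro rest
  induction rest with
  | nil => intro _ _ h; exact absurd rfl h
  | cons c rest' ih =>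
    intro i0 prev _
    rw [PySem.List.enumerate_cons]
    simp only [List.foldl_cons]
    have hrow : levRowA prev (i0 : Int) c [] = [(i0 : Int) + 1] := by
      simp [levRowA, PySem.List.enumerate]
    rw [hrow]
    by_cases hre : rest' = []
    · subst hre; simp [PySem.List.enumerate]
    · have hcast : ((i0 : Int) + 1) = ((i0 + 1 : Nat) : Int) := by push_cast; ring
      rw [hcast, ih (i0 + 1) _ hre]
      congr 1
      simp only [List.length_cons]
      push_cast; ring

theorem within_eq_core (s1 s2 : List Char) (k : Int) (hle : s2.length ≤ s1.length) :
    withinB s1 s2 k = decide (levenshteinA s1 s2 ≤ k) := by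
  rw [withinB.eq_def, levenshteinA.eq_def]
  simp only [if_neg (show ¬(s1.length < s2.length) from by omega)]
  have hcastn : ((s2.length : Int) + 1) = ((s2.length + 1 : Nat) : Int) := by push_cast; ring
  have hrange : PySem.List.pyRange 0 ((s2.length : Int) + 1) 1
      = List.map (fun k => ((k : Nat) : Int)) (List.range (s2.length + 1)) := by
    rw [hcastn]; exact PySem.List.pyRange_zero_natCast _
  have hlen0 : (PySem.List.pyRange 0 ((s2.length : Int) + 1) 1).length = s2.length + 1 := by
    rw [hrange]; simp
  by_cases hn : s2.length = 0
  · rw [if_pos hn]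
    have hs2 : s2 = [] := List.length_eq_zero_iff.mp hn
    subst hs2
    by_cases hk : ((s1.length : Int) - (([] : List Char).length : Int)) > k
    · rw [if_pos hk]
      symm; simp at hk ⊢; omega
    · rw [if_neg hk]
      have hl := loop_main [] k s1 0 _ hlen0
      simp only [Nat.cast_zero] at hl
      rw [hl]
      by_cases hs1 : s1 = []
      · subst hs1
        simp [PySem.List.enumerate]
        rw [show PySem.List.pyGetD (PySem.List.pyRange 0 1) (-1) 0 = 0 from rfl]
      · have hfr := finalRow_empty s1 0 (PySem.List.pyRange 0 ((([] : List Char).length : Int) + 1) 1) hs1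
        simp only [Nat.cast_zero] at hfr
        rw [hfr]
        rw [PySem.List.pyGetD_neg_one _ 0 (by simp)]
        simp
  · rw [if_neg hn]
    by_cases hk : ((s1.length : Int) - (s2.length : Int)) > k
    · rw [if_pos hk]
      have hLB0 : LB (PySem.List.pyRange 0 ((s2.length : Int) + 1) 1) ((0 : Nat) : Int) := by
        apply LB_of_all
        intro e he
        rw [hrange] at he
        simp at he
        obtain ⟨j, _, rfl⟩ := he
        positivity
      have hfl := final_LB s2 s1 0 _ hLB0 hlen0
      simp only [Nat.cast_zero] at hfl
      set fin := (PySem.List.enumerate s1).foldl (fun p ic => levRowA p ic.1 ic.2 s2) (PySem.List.pyRange 0 ((s2.length : Int) + 1) 1) with hfin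
      have hne : fin ≠ [] := by
        intro hcon; rw [hcon] at hfl; simp at hfl
      have hgl := LB_getLast fin _ hfl.1 hne
      rw [hfl.2] at hgl
      rw [PySem.List.pyGetD_neg_one fin 0 hne]
      symm; simp
      push_cast at hgl
      omega
    · rw [if_neg hk]
      have hl := loop_main s2 k s1 0 _ hlen0
      simp only [Nat.cast_zero] at hl
      exact hl

theorem within_eq (s1 s2 : List Char) (k : Int) :
    withinB s1 s2 k = decide (levenshteinA s1 s2 ≤ k) := by
  by_cases hlt : s1.length < s2.length
  · rw [withinB.eq_def, levenshteinA.eq_def]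
    simp only [if_pos hlt]
    exact within_eq_core s2 s1 k (by omega)
  · exact within_eq_core s1 s2 k (by omega)

-- ===== VERDICT (by name: the statement is the Claim_ definition above) =====
theorem string_suggestions_spec : Claim_equal_string_suggestions := by
  intro source possibilities max_distance _
  unfold Spec_string_suggestions string_suggestions string_suggestions_alt
  simp only [within_eq]
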